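-- pv_equiv track=rewrite | github.com/maikyonn/wake-sleep-refactor | src/utils_new.py | relative_label_sequence
-- ===== SOURCE A (Python) =====
-- from typing import Iterable, List, Sequence, Tuple
--
-- def relative_label_sequence(labels: Iterable[str]) -> List[str]:
--     """
--     Map first‑seen label → 'A', next unseen → 'B', etc.
--     Provides a canonical “ABA…” view of any alphabet.
--
--     Example: ['X','Y','Z','X'] → ['A','B','C','A']
--     """
--     mapping: dict[str, str] = {}
--     next_ord = ord("A")
--     rel: list[str] = []
--
--     for lab in labels:
--         if lab not in mapping:
--             mapping[lab] = chr(next_ord)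
--             next_ord += 1
--         rel.append(mapping[lab])
--     return rel
-- ===== SOURCE B (Python) =====
-- def relative_label_sequence(labels):
--     """Stateless positional formulation: the letter of each occurrence is
--     determined directly from the sequence itself -- it is 'A' shifted by the
--     number of distinct labels occurring strictly before the FIRST occurrence
--     of that label.  No mapping table and no incremental seen-state is kept;
--     each element's letter is recomputed from scratch."""
--     labels = list(labels)
--     return [chr(ord("A") + len(set(labels[:labels.index(lab)])))
--             for lab in labels]
-- ===== Notes on version B (the rewrite author's own statement) =====
-- stated objective: alternative
-- what changed: A's stateful single pass (a growing dict plus a next-letter counter) is replaced by a stateless per-element formula: each occurrence's letter is chr(ord('A') + number of distinct labels strictly before the first occurrence of that label), computed with labels.index and set() on a prefix slice, with no mapping table and no accumulated state.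
import Mathlib
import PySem

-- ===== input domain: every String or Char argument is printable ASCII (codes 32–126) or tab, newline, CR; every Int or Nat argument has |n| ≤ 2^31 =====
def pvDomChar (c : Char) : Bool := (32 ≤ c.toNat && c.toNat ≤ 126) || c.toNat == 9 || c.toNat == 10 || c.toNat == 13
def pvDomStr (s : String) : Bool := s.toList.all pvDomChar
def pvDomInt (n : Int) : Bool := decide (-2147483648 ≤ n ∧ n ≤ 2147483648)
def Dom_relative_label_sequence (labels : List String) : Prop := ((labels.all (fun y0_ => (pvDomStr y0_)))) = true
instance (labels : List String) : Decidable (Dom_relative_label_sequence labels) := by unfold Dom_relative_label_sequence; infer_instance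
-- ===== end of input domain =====

-- B replaces A's stateful pass (growing dict + next-letter counter) by a stateless
-- per-element formula: the letter of each occurrence is 'A' shifted by the number of
-- distinct labels strictly before the FIRST occurrence of that label.

-- ===== PORT A =====
-- fused loop: mapping dict, next_ord counter, rel accumulator
def relative_label_sequence (labels : List String) : List String :=
  (labels.foldl
    (fun (st : PySem.Dict String String × Int × List String) lab =>
      let mapping := st.1
      let next_ord := st.2.1
      let rel := st.2.2
      if mapping.contains lab then
        (mapping, next_ord, rel ++ [mapping.getD lab ""])
      else
        let mapping' := mapping.insert lab (String.ofList [Char.ofNat next_ord.toNat])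
        (mapping', next_ord + 1, rel ++ [mapping'.getD lab ""]))
    ((PySem.Dict.empty : PySem.Dict String String), (65 : Int), ([] : List String))).2.2

-- ===== PORT B =====
-- stateless: per element, chr(ord('A') + len(set(labels[:labels.index(lab)])));
-- labels.index never raises here (lab ∈ labels), so index? is always some — the
-- none branch is unreachable and returns "".
def relative_label_sequence_alt (labels : List String) : List String :=
  labels.map (fun lab =>
    match PySem.List.index? labels lab with
    | some j =>
        String.ofList
          [Char.ofNat (65 + (PySem.Set.ofList (PySem.List.slice labels none (some (j : Int)))).length)]
    | none => "")

-- ===== PRECONDITION & SPEC =====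
def Spec_relative_label_sequence (labels : List String) (out : List String) : Prop := out = relative_label_sequence_alt labels
instance (labels : List String) (out : List String) : Decidable (Spec_relative_label_sequence labels out) := by unfold Spec_relative_label_sequence; infer_instance

-- ===== CLAIM (what is proved, stated in full; the proofs are below) =====
def Claim_equal_relative_label_sequence : Prop := ∀ (labels : List String), Dom_relative_label_sequence labels → Spec_relative_label_sequence labels (relative_label_sequence labels)

-- ===== LEMMAS AND PROOFS =====

-- the letter assigned to first-seen index k
def pvLetter (k : Int) : String := String.ofList [Char.ofNat (65 + k).toNat]

-- A's mapping dict as an items list: label u[i] ↦ letter (k+i)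
def pvPairs (k : Int) (u : List String) : List (String × String) :=
  (PySem.List.enumerate u k).map (fun p => (p.2, pvLetter p.1))

def pvDict (k : Int) (u : List String) : PySem.Dict String String := PySem.Dict.mk (pvPairs k u)

-- A's loop step, named for the proofs (definitionally A's lambda)
def pvStepA (st : PySem.Dict String String × Int × List String) (lab : String) :
    PySem.Dict String String × Int × List String :=
  let mapping := st.1
  let next_ord := st.2.1
  let rel := st.2.2
  if mapping.contains lab then
    (mapping, next_ord, rel ++ [mapping.getD lab ""])
  else
    let mapping' := mapping.insert lab (String.ofList [Char.ofNat next_ord.toNat])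
    (mapping', next_ord + 1, rel ++ [mapping'.getD lab ""])

lemma pvA_eq (labels : List String) :
    relative_label_sequence labels = (labels.foldl pvStepA (pvDict 0 [], 65, [])).2.2 := rfl

lemma pvPairs_cons (k : Int) (x : String) (u : List String) :
    pvPairs k (x :: u) = (x, pvLetter k) :: pvPairs (k + 1) u := by
  simp [pvPairs, PySem.List.enumerate_cons]

lemma pvPairs_append_singleton (k : Int) (u : List String) (x : String) :
    pvPairs k (u ++ [x]) = pvPairs k u ++ [(x, pvLetter (k + u.length))] := by
  induction u generalizing k with
  | nil => simp [pvPairs, PySem.List.enumerate_cons, PySem.List.enumerate_nil]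
  | cons y u ih =>
      rw [List.cons_append, pvPairs_cons, pvPairs_cons, ih]
      simp
      ring_nf

lemma pv_get? (u : List String) (k : Int) (lab : String) :
    (pvDict k u).get? lab =
      if lab ∈ u then some (pvLetter (k + u.idxOf lab)) else none := by
  induction u generalizing k with
  | nil => simp [pvDict, pvPairs, PySem.List.enumerate_nil]; rfl
  | cons x u ih =>
      rw [pvDict, pvPairs_cons]
      rw [PySem.Dict.get?_mk_cons]
      by_cases hx : x = lab
      · subst hx; simp
      · have : (x == lab) = false := by simp [hx]
        rw [this]
        simp only [Bool.false_eq_true, if_false]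
        rw [show PySem.Dict.mk (pvPairs (k+1) u) = pvDict (k+1) u from rfl, ih]
        by_cases hm : lab ∈ u
        · simp [hm, List.mem_cons, Ne.symm hx, hx]
          ring_nf
        · simp [hm, List.mem_cons, Ne.symm hx]

lemma pv_keys (k : Int) (u : List String) : (pvDict k u).keys = u := by
  simp [pvDict, pvPairs, PySem.Dict.keys_mk, List.map_map, Function.comp_def,
    PySem.List.map_snd_enumerate]

lemma pv_contains (k : Int) (u : List String) (lab : String) :
    (pvDict k u).contains lab = decide (lab ∈ u) := by
  rw [PySem.Dict.contains_eq_decide_mem_keys, pv_keys]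

lemma pv_insert_fresh (k : Int) (u : List String) (lab : String) (h : lab ∉ u) :
    (pvDict k u).insert lab (pvLetter (k + u.length)) = pvDict k (u ++ [lab]) := by
  apply PySem.Dict.ext
  rw [PySem.Dict.items_insert_of_not_contains]
  · show pvPairs k u ++ [(lab, pvLetter (k + u.length))] = pvPairs k (u ++ [lab])
    rw [pvPairs_append_singleton]
  · rw [pv_contains]; simp [h]

lemma pv_getD_prefix (u t : List String) (lab : String) (h : lab ∈ u) :
    (pvDict 0 (u ++ t)).getD lab "" = pvLetter (u.idxOf lab) := by
  rw [PySem.Dict.getD_eq_get?_getD, pv_get?]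
  simp [h, List.idxOf_append_of_mem h]

-- main invariant for A's loop: starting from the table of u, the loop emits
-- exactly the lookups in the full final table of (Set.update u rest)
lemma pv_loopA (rest : List String) : ∀ (u rel : List String),
    (rest.foldl pvStepA (pvDict 0 u, 65 + (u.length : Int), rel)).2.2
      = rel ++ rest.map (fun lab => (pvDict 0 (PySem.Set.update u rest)).getD lab "") := by
  induction rest with
  | nil => intro u rel; simp [PySem.Set.update_nil]
  | cons lab rest ih =>
      intro u rel
      rw [List.foldl_cons]
      by_cases hm : lab ∈ u
      · have hc : (pvDict 0 u).contains lab = true := by rw [pv_contains]; simp [hm]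
        have hstep : pvStepA (pvDict 0 u, 65 + (u.length : Int), rel) lab
            = (pvDict 0 u, 65 + (u.length : Int), rel ++ [(pvDict 0 u).getD lab ""]) := by
          simp [pvStepA, hc]
        rw [hstep, ih]
        have hupd : PySem.Set.update u (lab :: rest) = PySem.Set.update u rest := by
          rw [PySem.Set.update_cons, PySem.Set.add_of_mem hm]
        have hW : ∃ t, PySem.Set.update u rest = u ++ t := by
          exact ⟨_, PySem.Set.update_eq_append_filter u rest⟩
        obtain ⟨t, ht⟩ := hW
        have hhead : (pvDict 0 u).getD lab ""
            = (pvDict 0 (PySem.Set.update u rest)).getD lab "" := by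
          rw [ht, pv_getD_prefix u t lab hm]
          have := pv_getD_prefix u [] lab hm
          simpa using this
        rw [hupd, List.map_cons, hhead]
        simp
      · have hc : (pvDict 0 u).contains lab = false := by rw [pv_contains]; simp [hm]
        have hval : String.ofList [Char.ofNat (65 + (u.length : Int)).toNat]
            = pvLetter ((0 : Int) + u.length) := by simp [pvLetter]
        have hins : (pvDict 0 u).insert lab (String.ofList [Char.ofNat (65 + (u.length : Int)).toNat])
            = pvDict 0 (u ++ [lab]) := by
          rw [hval]; exact pv_insert_fresh 0 u lab hm
        have hstep : pvStepA (pvDict 0 u, 65 + (u.length : Int), rel) lab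
            = (pvDict 0 (u ++ [lab]), 65 + (((u ++ [lab]).length : Nat) : Int),
               rel ++ [(pvDict 0 (u ++ [lab])).getD lab ""]) := by
          simp only [pvStepA, hc, Bool.false_eq_true, if_false]
          rw [hins]
          have harith : (65 + (u.length : Int)) + 1 = 65 + (((u ++ [lab]).length : Nat) : Int) := by
            simp; ring
          rw [harith]
        rw [hstep, ih]
        have hupd : PySem.Set.update u (lab :: rest) = PySem.Set.update (u ++ [lab]) rest := by
          rw [PySem.Set.update_cons, PySem.Set.add_of_not_mem hm]
        obtain ⟨t, ht⟩ : ∃ t, PySem.Set.update (u ++ [lab]) rest = (u ++ [lab]) ++ t :=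
          ⟨_, PySem.Set.update_eq_append_filter (u ++ [lab]) rest⟩
        have hhead : (pvDict 0 (u ++ [lab])).getD lab ""
            = (pvDict 0 (PySem.Set.update (u ++ [lab]) rest)).getD lab "" := by
          rw [ht, pv_getD_prefix (u ++ [lab]) t lab (by simp)]
          have := pv_getD_prefix (u ++ [lab]) [] lab (by simp)
          simpa using this
        rw [hupd, List.map_cons, hhead]
        simp

-- the rank of lab in the first-seen dedup equals the number of distinct labels
-- strictly before lab's first occurrence
lemma pv_rank (pre suf : List String) (lab : String) (h : lab ∉ pre) :
    (PySem.Set.ofList (pre ++ lab :: suf)).idxOf lab = (PySem.Set.ofList pre).length := by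
  have hnm : lab ∉ PySem.Set.ofList pre := by
    simpa [PySem.Set.mem_ofList] using h
  rw [PySem.Set.ofList_append, PySem.Set.update_cons, PySem.Set.add_of_not_mem hnm]
  obtain ⟨t, ht⟩ : ∃ t, PySem.Set.update (PySem.Set.ofList pre ++ [lab]) suf
      = (PySem.Set.ofList pre ++ [lab]) ++ t :=
    ⟨_, PySem.Set.update_eq_append_filter _ suf⟩
  rw [ht, List.idxOf_append_of_mem (by simp), List.idxOf_append_of_notMem hnm]
  simp

-- ===== VERDICT (by name: the statement is the Claim_ definition above) =====
theorem relative_label_sequence_spec : Claim_equal_relative_label_sequence := by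
  intro labels _
  show relative_label_sequence labels = relative_label_sequence_alt labels
  rw [pvA_eq]
  have h0 : (65 : Int) = 65 + (([] : List String).length : Int) := by simp
  rw [h0, pv_loopA labels [] []]
  rw [PySem.Set.update_nil_left]
  unfold relative_label_sequence_alt
  simp only [List.nil_append]
  apply List.map_congr_left
  intro lab hmem
  obtain ⟨j, hj⟩ : ∃ j, PySem.List.index? labels lab = some j := by
    have := (PySem.List.index?_isSome_iff labels lab).2 hmem
    exact Option.isSome_iff_exists.mp this
  obtain ⟨pre, suf, hsplit, hlen, hnotpre⟩ := (PySem.List.index?_eq_some_iff labels lab j).1 hj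
  rw [hj]
  have hu : lab ∈ PySem.Set.ofList labels := by simpa [PySem.Set.mem_ofList] using hmem
  obtain ⟨t, ht⟩ : ∃ t, PySem.Set.ofList labels = PySem.Set.ofList labels ++ t := ⟨[], by simp⟩
  have hgetD : (pvDict 0 (PySem.Set.ofList labels)).getD lab ""
      = pvLetter ((PySem.Set.ofList labels).idxOf lab) := by
    have := pv_getD_prefix (PySem.Set.ofList labels) [] lab hu
    simpa using this
  rw [hgetD]
  dsimp only
  have hslice : PySem.List.slice labels none (some (j : Int)) = pre := by
    rw [PySem.List.slice_to_natCast, ← hlen, hsplit, List.take_left]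
  rw [hslice, hsplit, pv_rank pre suf lab hnotpre]
  simp only [pvLetter]
  congr 2
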